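-- pv_equiv track=rewrite | github.com/yyrrll/wizard | 1-procedures/2-procedures-processes/make_change.py | make_change_rcrsv
-- ===== SOURCE A (Python) =====
-- from copy import copy
--
-- DENOMINATIONS = [
--  #  20 * 100,
--  #  10 * 100,
--  #   5 * 100,
--          100,
--           50,
--           25,
--           10,
--            5,
--            1,
--     ]
--
-- def make_change_rcrsv(amount, denominations=copy(DENOMINATIONS)):
--     if not denominations:
--         change = []
--     else:
--         change = [amount % denominations[0]]
--         change.extend(
--                 make_change_rcrsv(
--                     amount-change[0]* denominations[0],
--                     denominations[1:]))
--
--     return change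
-- ===== SOURCE B (Python) =====
-- from copy import copy
--
-- DENOMINATIONS = [
--          100,
--           50,
--           25,
--           10,
--            5,
--            1,
--     ]
--
-- def make_change_rcrsv(amount, denominations=copy(DENOMINATIONS)):
--     change = []
--     for denom in denominations:
--         r = amount % denom
--         change.append(r)
--         amount -= r * denom
--     return change
-- ===== Notes on version B (the rewrite author's own statement) =====
-- stated objective: simpler
-- what changed: Replaces tail recursion with list slicing per call by a single iterative loop over the denominations with an accumulator list and in-place amount update.
-- outside the precondition, e.g. on make_change_rcrsv(7, [0]): A raises ZeroDivisionError, B raises ZeroDivisionError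
import Mathlib
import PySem

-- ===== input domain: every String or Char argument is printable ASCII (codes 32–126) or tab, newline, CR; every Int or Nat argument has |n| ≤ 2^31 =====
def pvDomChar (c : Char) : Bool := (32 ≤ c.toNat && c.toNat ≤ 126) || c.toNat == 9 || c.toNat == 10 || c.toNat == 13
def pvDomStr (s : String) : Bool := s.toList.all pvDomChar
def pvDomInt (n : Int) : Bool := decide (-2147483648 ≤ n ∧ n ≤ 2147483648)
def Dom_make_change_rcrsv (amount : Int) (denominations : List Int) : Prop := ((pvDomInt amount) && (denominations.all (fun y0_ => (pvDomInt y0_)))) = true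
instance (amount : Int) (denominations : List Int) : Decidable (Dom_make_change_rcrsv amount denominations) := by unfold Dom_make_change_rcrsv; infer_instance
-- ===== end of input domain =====

-- ===== PORT A =====
-- B replaces A's tail recursion (with per-call list slicing) by one iterative loop; objective: simpler.
def make_change_rcrsv (amount : Int) (denominations : List Int) : List Int :=
  match denominations with
  | [] => []
  | d :: rest =>
    let c0 := PySem.Int.mod amount d
    c0 :: make_change_rcrsv (amount - c0 * d) rest

-- ===== PORT B =====
def make_change_rcrsv_alt (amount : Int) (denominations : List Int) : List Int :=
  (denominations.foldl
    (fun (st : Int × List Int) denom =>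
      let r := PySem.Int.mod st.1 denom
      (st.1 - r * denom, st.2 ++ [r]))
    (amount, [])).2

-- ===== PRECONDITION & SPEC =====
-- Pre_ excludes denomination lists containing 0, on which Python's '%' raises ZeroDivisionError.
def Pre_make_change_rcrsv (amount : Int) (denominations : List Int) : Prop :=
  (0 : Int) ∉ denominations
instance (amount : Int) (denominations : List Int) : Decidable (Pre_make_change_rcrsv amount denominations) := by unfold Pre_make_change_rcrsv; infer_instance
def pvWitness_make_change_rcrsv : Int × List Int := (137, [100, 50, 25, 10, 5, 1])
def Spec_make_change_rcrsv (amount : Int) (denominations : List Int) (out : List Int) : Prop := out = make_change_rcrsv_alt amount denominations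
instance (amount : Int) (denominations : List Int) (out : List Int) : Decidable (Spec_make_change_rcrsv amount denominations out) := by unfold Spec_make_change_rcrsv; infer_instance

-- ===== CLAIM (what is proved, stated in full; the proofs are below) =====
def Claim_equal_make_change_rcrsv : Prop := ∀ (amount : Int) (denominations : List Int), Dom_make_change_rcrsv amount denominations → Pre_make_change_rcrsv amount denominations → Spec_make_change_rcrsv amount denominations (make_change_rcrsv amount denominations)

-- ===== LEMMAS AND PROOFS =====
-- Loop invariant: B's foldl started from (a, acc) produces acc ++ (A's recursive result on a).
theorem foldl_change (denominations : List Int) (a : Int) (acc : List Int) :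
    (denominations.foldl
      (fun (st : Int × List Int) denom =>
        let r := PySem.Int.mod st.1 denom
        (st.1 - r * denom, st.2 ++ [r]))
      (a, acc)).2 = acc ++ make_change_rcrsv a denominations := by
  induction denominations generalizing a acc with
  | nil => simp [make_change_rcrsv]
  | cons d rest ih =>
    simp only [List.foldl_cons, make_change_rcrsv]
    rw [ih]
    simp

-- ===== VERDICT (by name: the statement is the Claim_ definition above) =====
theorem make_change_rcrsv_spec : Claim_equal_make_change_rcrsv := by
  intro amount denominations _ _
  unfold Spec_make_change_rcrsv make_change_rcrsv_alt
  rw [foldl_change]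
  simp
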